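-- pv_equiv track=rewrite | github.com/seonjuuu/mathematical-programming | 9.py | lrg_sum
-- ===== SOURCE A (Python) =====
-- def  lrg_sum(L,k,m):
--     ret = 0
--     cnt = 0
--     L.sort()
--     L=L[::-1] #L[6,...]
--     while cnt<m:
--         subcnt = 0
--         while subcnt < k and cnt < m :
--             ret = ret+L[0]
--             subcnt=subcnt+1
--             cnt=cnt+1
--         if cnt < m :
--             ret = ret+L[1]
--             cnt = cnt+1
--     return ret
-- ===== SOURCE B (Python) =====
-- def lrg_sum(L, k, m):
--     # Same observable mutation as A: L ends up sorted ascending.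
--     L.sort()
--     if m <= 0:
--         return 0
--     q, r = divmod(m, k + 1)
--     total = (q * k + r) * L[-1]
--     if q:
--         total += q * L[-2]
--     return total
-- ===== Notes on version B (the rewrite author's own statement) =====
-- stated objective: alternative
-- what changed: Replaces A's term-by-term simulation of the k-then-1 repeating pattern (one loop iteration per term, m iterations after sorting) with a closed form: q,r = divmod(m,k+1) gives (q*k+r)*max + q*second_max directly from the ascending sort; the O(n log n) sort dominates both.
-- outside the precondition, e.g. on lrg_sum([1, 2], -1, 3): A returns 3, B raises ZeroDivisionError
import Mathlib
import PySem

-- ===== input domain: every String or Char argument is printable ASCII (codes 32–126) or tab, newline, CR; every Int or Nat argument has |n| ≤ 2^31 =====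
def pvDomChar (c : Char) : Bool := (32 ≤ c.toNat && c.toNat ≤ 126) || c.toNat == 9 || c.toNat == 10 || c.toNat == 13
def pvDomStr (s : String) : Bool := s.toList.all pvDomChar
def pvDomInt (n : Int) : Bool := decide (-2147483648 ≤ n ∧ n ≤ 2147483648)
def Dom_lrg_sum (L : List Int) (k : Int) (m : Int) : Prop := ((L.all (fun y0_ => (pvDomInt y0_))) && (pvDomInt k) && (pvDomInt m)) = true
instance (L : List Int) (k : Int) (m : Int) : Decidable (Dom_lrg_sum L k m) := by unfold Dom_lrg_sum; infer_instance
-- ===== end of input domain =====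

-- B replaces A's m-iteration simulation of the k-then-1 pattern by the closed form
-- (q*k+r)*max + q*second_max with q,r = divmod(m,k+1) (objective: alternative).
-- A sorts L in place (caller observes L sorted ascending); B performs the same mutation;
-- the equivalence proved here is about the RETURN value.

-- ===== PORT A =====
-- inner 'while subcnt < k and cnt < m' loop; fuel bounds the iterations (≤ m.toNat under Pre_)
def lrgInner (L : List Int) (k m : Int) : Int → Int → Int → Nat → (Int × Int)
  | ret, _subcnt, cnt, 0 => (ret, cnt)
  | ret, subcnt, cnt, fuel + 1 =>
    if subcnt < k ∧ cnt < m then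
      lrgInner L k m (ret + PySem.List.pyGetD L 0 0) (subcnt + 1) (cnt + 1) fuel
    else (ret, cnt)

-- outer 'while cnt < m' loop
def lrgOuter (L : List Int) (k m : Int) : Int → Int → Nat → Int
  | ret, _cnt, 0 => ret
  | ret, cnt, fuel + 1 =>
    if cnt < m then
      let p := lrgInner L k m ret 0 cnt m.toNat
      if p.2 < m then lrgOuter L k m (p.1 + PySem.List.pyGetD L 1 0) (p.2 + 1) fuel
      else lrgOuter L k m p.1 p.2 fuel
    else ret

def lrg_sum (L : List Int) (k : Int) (m : Int) : Int :=
  -- L.sort(); L = L[::-1]  (slice? xs none none (-1) = reverse, PySem.List.slice?_none_none_neg_one)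
  let Lr := (PySem.List.sorted L (fun x => x) false).reverse
  lrgOuter Lr k m 0 0 m.toNat

-- ===== PORT B =====
def lrg_sum_alt (L : List Int) (k : Int) (m : Int) : Int :=
  let Ls := PySem.List.sorted L (fun x => x) false
  if m ≤ 0 then 0
  else
    let q := PySem.Int.floordiv m (k + 1)
    let r := PySem.Int.mod m (k + 1)
    let total := (q * k + r) * PySem.List.pyGetD Ls (-1) 0
    if q ≠ 0 then total + q * PySem.List.pyGetD Ls (-2) 0 else total

-- ===== PRECONDITION & SPEC =====
-- Pre_ excludes (only when m > 0, where the result depends on L and k): (a) negative k, on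
-- which A returns m·(second largest) — an accident of the loop structure (the inner loop never
-- runs), while B's division by k+1 raises or differs; (b) lists too short for the indices A
-- actually reads (IndexError).
def Pre_lrg_sum (L : List Int) (k : Int) (m : Int) : Prop :=
  0 < m → (0 ≤ k ∧ (2 ≤ L.length ∨ (1 ≤ L.length ∧ m ≤ k)))
instance (L : List Int) (k : Int) (m : Int) : Decidable (Pre_lrg_sum L k m) := by unfold Pre_lrg_sum; infer_instance

def pvWitness_lrg_sum : List Int × Int × Int := ([3, 1, 5], 2, 7)

def Spec_lrg_sum (L : List Int) (k : Int) (m : Int) (out : Int) : Prop := out = lrg_sum_alt L k m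
instance (L : List Int) (k : Int) (m : Int) (out : Int) : Decidable (Spec_lrg_sum L k m out) := by unfold Spec_lrg_sum; infer_instance

-- ===== CLAIM (what is proved, stated in full; the proofs are below) =====
def Claim_equal_lrg_sum : Prop := ∀ (L : List Int) (k : Int) (m : Int), Dom_lrg_sum L k m → Pre_lrg_sum L k m → Spec_lrg_sum L k m (lrg_sum L k m)

-- ===== LEMMAS AND PROOFS =====

-- closed form of the remaining sum, as a function of the number n of terms still to add
def lrgClosed (a b k n : Int) : Int :=
  if n ≤ 0 then 0
  else (PySem.Int.floordiv n (k + 1) * k + PySem.Int.mod n (k + 1)) * a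
        + PySem.Int.floordiv n (k + 1) * b

theorem lrgInner_eval (L : List Int) (k m : Int) (ret subcnt cnt : Int) (fuel : Nat)
    (hf : (min (k - subcnt) (m - cnt)).toNat ≤ fuel) :
    lrgInner L k m ret subcnt cnt fuel =
      (ret + (max 0 (min (k - subcnt) (m - cnt))) * PySem.List.pyGetD L 0 0,
       cnt + max 0 (min (k - subcnt) (m - cnt))) := by
  induction fuel generalizing ret subcnt cnt with
  | zero =>
    simp only [lrgInner]
    have : max 0 (min (k - subcnt) (m - cnt)) = 0 := by omega
    simp [this]
  | succ fuel ih =>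
    simp only [lrgInner]
    by_cases h : subcnt < k ∧ cnt < m
    · rw [if_pos h, ih _ _ _ (by omega)]
      have h1 : max 0 (min (k - (subcnt + 1)) (m - (cnt + 1)))
          = max 0 (min (k - subcnt) (m - cnt)) - 1 := by omega
      rw [h1]
      simp only [Prod.mk.injEq]
      exact ⟨by ring, by omega⟩
    · rw [if_neg h]
      have : max 0 (min (k - subcnt) (m - cnt)) = 0 := by omega
      simp [this]

theorem lrgClosed_le (a b k n : Int) (hk : 0 ≤ k) (hn : 0 < n) (h : n ≤ k) :
    lrgClosed a b k n = n * a := by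
  unfold lrgClosed
  rw [if_neg (by omega)]
  have hq : PySem.Int.floordiv n (k + 1) = 0 := by
    rw [PySem.Int.floordiv_eq_iff_of_pos (by omega)]
    refine ⟨by nlinarith, by nlinarith⟩
  have h1 := PySem.Int.floordiv_mul_add_mod n (k + 1)
  rw [hq] at h1
  simp only [zero_mul, zero_add] at h1
  rw [hq, h1]; ring

theorem lrgClosed_gt (a b k n : Int) (hk : 0 ≤ k) (h : k < n) :
    lrgClosed a b k n = k * a + b + lrgClosed a b k (n - (k + 1)) := by
  have hd : (0:Int) < k + 1 := by omega
  have hstep : ∀ x : Int, PySem.Int.floordiv (x + (k+1)) (k+1) = PySem.Int.floordiv x (k+1) + 1 ∧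
      PySem.Int.mod (x + (k+1)) (k+1) = PySem.Int.mod x (k+1) := by
    intro x
    have h1 := PySem.Int.floordiv_mul_add_mod x (k + 1)
    have h2 : PySem.Int.floordiv (x + (k+1)) (k+1) = PySem.Int.floordiv x (k+1) + 1 := by
      rw [PySem.Int.floordiv_eq_iff_of_pos hd]
      have hlo := PySem.Int.mod_nonneg x hd
      have hhi := PySem.Int.mod_lt x hd
      constructor <;> nlinarith
    have h3 := PySem.Int.floordiv_mul_add_mod (x + (k+1)) (k+1)
    refine ⟨h2, ?_⟩
    rw [h2] at h3; nlinarith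
  unfold lrgClosed
  rw [if_neg (by omega)]
  by_cases hz : n - (k + 1) ≤ 0
  · -- here n = k + 1 exactly (k < n ≤ k + 1)
    have hn : n = k + 1 := by omega
    have h0q : PySem.Int.floordiv (0:Int) (k+1) = 0 := by
      rw [PySem.Int.floordiv_eq_iff_of_pos hd]
      refine ⟨by nlinarith, by nlinarith⟩
    have h0r : PySem.Int.mod (0:Int) (k+1) = 0 := by
      have h1 := PySem.Int.floordiv_mul_add_mod (0:Int) (k + 1)
      rw [h0q] at h1
      simpa using h1
    obtain ⟨hq, hr⟩ := hstep 0
    rw [zero_add] at hq hr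
    rw [h0q] at hq
    rw [h0r] at hr
    rw [if_pos hz, hn, hq, hr]; ring
  · rw [if_neg hz]
    obtain ⟨hq, hr⟩ := hstep (n - (k + 1))
    have hn' : n - (k+1) + (k+1) = n := by ring
    rw [hn'] at hq hr
    rw [hq, hr]; ring

theorem lrgOuter_eval (L : List Int) (k m : Int) (hk : 0 ≤ k) (ret cnt : Int)
    (hc : 0 ≤ cnt) (fuel : Nat) (hf : (m - cnt).toNat ≤ fuel) :
    lrgOuter L k m ret cnt fuel =
      ret + lrgClosed (PySem.List.pyGetD L 0 0) (PySem.List.pyGetD L 1 0) k (m - cnt) := by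
  induction fuel generalizing ret cnt with
  | zero =>
    simp only [lrgOuter]
    have : m - cnt ≤ 0 := by omega
    unfold lrgClosed; rw [if_pos this]; ring
  | succ fuel ih =>
    simp only [lrgOuter]
    by_cases h : cnt < m
    · rw [if_pos h]
      rw [lrgInner_eval L k m ret 0 cnt m.toNat (by omega)]
      simp only [sub_zero]
      set a := PySem.List.pyGetD L 0 0
      set b := PySem.List.pyGetD L 1 0
      have ht : max 0 (min k (m - cnt)) = min k (m - cnt) := by omega
      rw [ht]
      by_cases hkm : m - cnt ≤ k
      · -- the inner loop exhausts the remaining terms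
        have hmin : min k (m - cnt) = m - cnt := by omega
        rw [hmin]
        rw [if_neg (by omega)]
        rw [ih _ _ (by omega) (by omega)]
        have h0 : m - (cnt + (m - cnt)) = 0 := by ring
        rw [h0]
        have hz : lrgClosed a b k 0 = 0 := by unfold lrgClosed; simp
        rw [hz, lrgClosed_le a b k (m - cnt) hk (by omega) hkm]
        ring
      · -- the inner loop adds k copies of a, then one b is added
        have hmin : min k (m - cnt) = k := by omega
        rw [hmin]
        rw [if_pos (by omega)]
        rw [ih _ _ (by omega) (by omega)]
        rw [lrgClosed_gt a b k (m - cnt) hk (by omega)]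
        have h1 : m - (cnt + k + 1) = m - cnt - (k + 1) := by ring
        rw [h1]; ring
    · rw [if_neg h]
      unfold lrgClosed
      rw [if_pos (by omega)]; ring

-- a negative-index read of a list is the corresponding front read of its reverse
theorem pyGetD_neg_rev (xs : List Int) (j : Nat) (hj : 0 < j) :
    PySem.List.pyGetD xs (-(j:Int)) 0 = xs.reverse.getD (j-1) 0 := by
  by_cases h : j ≤ xs.length
  · rw [PySem.List.pyGetD_neg_natCast xs j 0 hj h]
    rw [List.getD_eq_getElem _ _ (by simp; omega), List.getElem_reverse]
    congr 1; omega
  · rw [PySem.List.pyGetD_of_none, List.getD_eq_default]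
    · simp; omega
    · rw [PySem.List.pyGet?_eq_none_iff]
      simp only [PySem.Raise.InRange]
      omega

theorem pyGetD_neg_one_rev (xs : List Int) :
    PySem.List.pyGetD xs (-1) 0 = xs.reverse.getD 0 0 := by
  simpa using pyGetD_neg_rev xs 1 (by omega)

theorem pyGetD_neg_two_rev (xs : List Int) :
    PySem.List.pyGetD xs (-2) 0 = xs.reverse.getD 1 0 := by
  simpa using pyGetD_neg_rev xs 2 (by omega)

-- ===== VERDICT (by name: the statement is the Claim_ definition above) =====
theorem lrg_sum_spec : Claim_equal_lrg_sum := by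
  intro L k m _hdom hpre
  unfold Spec_lrg_sum lrg_sum lrg_sum_alt
  by_cases hm : m ≤ 0
  · have h0 : m.toNat = 0 := by omega
    dsimp only
    rw [if_pos hm, h0]
    rfl
  · obtain ⟨hk, -⟩ := hpre (by omega)
    set Ls := PySem.List.sorted L (fun x => x) false with hLs
    rw [lrgOuter_eval Ls.reverse k m hk 0 0 le_rfl m.toNat (by omega), sub_zero]
    rw [PySem.List.pyGetD_zero, PySem.List.pyGetD_ofNat' Ls.reverse 1 0]
    dsimp only
    rw [pyGetD_neg_one_rev, pyGetD_neg_two_rev]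
    rw [if_neg hm]
    unfold lrgClosed
    rw [if_neg (by omega)]
    by_cases hq : PySem.Int.floordiv m (k + 1) ≠ 0
    · rw [if_pos hq]; ring
    · rw [if_neg hq]
      rw [not_not] at hq
      rw [hq]; ring
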